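-- pv_equiv track=rewrite | github.com/kotrabakoff/SoftUni | Fundamentals/Exercise/08. Text Processing/02. Character Multiplier.py | sum_fun
-- ===== SOURCE A (Python) =====
-- def sum_fun(a, b):
--     total_sum = 0
--
--     for i in range(len(a)):
--         if i < len(b):
--             total_sum += ord(a[i]) * ord(b[i])
--         else:
--             total_sum += ord(a[i])
--     return total_sum
-- ===== SOURCE B (Python) =====
-- def sum_fun(a, b):
--     # Every character of a contributes ord(c) once; a paired position
--     # contributes ord(x)*ord(y) = ord(x) + ord(x)*(ord(y)-1), so add the
--     # correction ord(x)*(ord(y)-1) over the overlap.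
--     total = sum(map(ord, a))
--     for x, y in zip(a, b):
--         total += ord(x) * (ord(y) - 1)
--     return total
-- ===== Notes on version B (the rewrite author's own statement) =====
-- stated objective: alternative
-- what changed: Uses the identity ord(x)*ord(y) = ord(x) + ord(x)*(ord(y)-1): B sums ord over ALL of a uniformly (no branch, no tail slice), then adds a correction term over the zipped overlap, instead of A's per-index branch choosing product vs plain ord.
import Mathlib
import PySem

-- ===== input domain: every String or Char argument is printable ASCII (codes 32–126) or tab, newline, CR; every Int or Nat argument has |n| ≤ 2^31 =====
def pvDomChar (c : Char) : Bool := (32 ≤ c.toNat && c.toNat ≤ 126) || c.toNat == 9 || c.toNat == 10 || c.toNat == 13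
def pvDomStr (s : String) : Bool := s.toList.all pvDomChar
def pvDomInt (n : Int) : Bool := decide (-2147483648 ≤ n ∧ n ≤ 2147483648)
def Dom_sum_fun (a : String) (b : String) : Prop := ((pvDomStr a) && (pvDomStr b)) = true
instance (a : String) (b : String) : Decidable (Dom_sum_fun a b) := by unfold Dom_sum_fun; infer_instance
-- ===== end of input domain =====

-- B replaces A's per-index branch (product vs plain ord) by the identity
-- ord(x)*ord(y) = ord(x) + ord(x)*(ord(y)-1): sum ord over all of a, then add a
-- correction over the zipped overlap (objective: alternative decomposition).


-- ===== PORT A =====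
-- for i in range(len(a)): if i < len(b): total += ord(a[i])*ord(b[i]) else: total += ord(a[i])
-- indices are always in range, so getD is exact here
def sum_fun (a : String) (b : String) : Int :=
  let la := a.toList
  let lb := b.toList
  (List.range la.length).foldl
    (fun total_sum i =>
      if i < lb.length then
        total_sum + ((la.getD i ' ').toNat : Int) * ((lb.getD i ' ').toNat : Int)
      else
        total_sum + ((la.getD i ' ').toNat : Int))
    0

-- ===== PORT B =====
-- total = sum(map(ord, a)); for x, y in zip(a, b): total += ord(x)*(ord(y)-1)
def sum_fun_alt (a : String) (b : String) : Int :=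
  let base := (a.toList.map (fun c => (c.toNat : Int))).sum
  (a.toList.zip b.toList).foldl
    (fun total p => total + (p.1.toNat : Int) * ((p.2.toNat : Int) - 1)) base

-- ===== PRECONDITION & SPEC =====
def Spec_sum_fun (a : String) (b : String) (out : Int) : Prop := out = sum_fun_alt a b
instance (a : String) (b : String) (out : Int) : Decidable (Spec_sum_fun a b out) := by unfold Spec_sum_fun; infer_instance

-- ===== CLAIM (what is proved, stated in full; the proofs are below) =====
def Claim_equal_sum_fun : Prop := ∀ (a : String) (b : String), Dom_sum_fun a b → Spec_sum_fun a b (sum_fun a b)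

-- ===== LEMMAS AND PROOFS =====
-- A's branching range-loop equals: products over the zipped prefix plus ords over a's tail
lemma keyA (la lb : List Char) :
    ((List.range la.length).map
      (fun i => if i < lb.length then ((la.getD i ' ').toNat : Int) * ((lb.getD i ' ').toNat : Int)
                else ((la.getD i ' ').toNat : Int))).sum
    = ((la.zip lb).map (fun p => ((p.1.toNat : Int) * (p.2.toNat : Int)))).sum
      + ((la.drop lb.length).map (fun c => (c.toNat : Int))).sum := by
  induction la generalizing lb with
  | nil => simp
  | cons c la ih =>
    rw [List.length_cons, List.range_succ_eq_map, List.map_cons, List.map_map]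
    cases lb with
    | nil =>
      simp only [List.length_nil, Nat.not_lt_zero, if_false]
      rw [List.sum_cons]
      have hmap : (List.range la.length).map
          ((fun i => (((c :: la).getD i ' ').toNat : Int)) ∘ (· + 1))
          = (List.range la.length).map (fun i => ((la.getD i ' ').toNat : Int)) := by
        apply List.map_congr_left; intro i _; simp [Function.comp]
      rw [hmap]
      have := ih []
      simp only [List.length_nil, Nat.not_lt_zero, if_false, List.zip_nil_right,
        List.map_nil, List.sum_nil, List.drop_zero, zero_add] at this
      rw [this]
      simp
    | cons d lb =>
      simp only [List.zip_cons_cons, List.map_cons, List.sum_cons, List.length_cons,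
        List.drop_succ_cons]
      rw [if_pos (Nat.succ_pos lb.length)]
      simp only [List.getD_cons_zero]
      rw [add_assoc, ← ih lb]
      congr 1
      congr 1
      apply List.map_congr_left
      intro i _
      simp [Function.comp, Nat.succ_eq_add_one]

-- the algebraic bridge: zip-products + tail-ords = all-ords + zip-corrections
lemma keyB (la lb : List Char) :
    ((la.zip lb).map (fun p => ((p.1.toNat : Int) * (p.2.toNat : Int)))).sum
      + ((la.drop lb.length).map (fun c => (c.toNat : Int))).sum
    = (la.map (fun c => (c.toNat : Int))).sum
      + ((la.zip lb).map (fun p => (p.1.toNat : Int) * ((p.2.toNat : Int) - 1))).sum := by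
  induction la generalizing lb with
  | nil => simp
  | cons c la ih =>
    cases lb with
    | nil => simp
    | cons d lb =>
      simp only [List.zip_cons_cons, List.map_cons, List.sum_cons, List.length_cons,
        List.drop_succ_cons]
      have := ih lb
      push_cast at this ⊢
      linarith [this]

-- ===== VERDICT (by name: the statement is the Claim_ definition above) =====
theorem sum_fun_spec : Claim_equal_sum_fun := by
  intro a b _
  unfold Spec_sum_fun sum_fun sum_fun_alt
  simp only
  have hA : (fun (total_sum : Int) (i : Nat) =>
      if i < b.toList.length then total_sum + ((a.toList.getD i ' ').toNat : Int) * ((b.toList.getD i ' ').toNat : Int)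
      else total_sum + ((a.toList.getD i ' ').toNat : Int))
      = fun (total_sum : Int) (i : Nat) => total_sum +
          (if i < b.toList.length then ((a.toList.getD i ' ').toNat : Int) * ((b.toList.getD i ' ').toNat : Int)
           else ((a.toList.getD i ' ').toNat : Int)) := by
    funext t i; split_ifs <;> rfl
  rw [hA, PySem.List.foldl_add, PySem.List.foldl_add, zero_add, keyA, keyB]
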